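-- pv_equiv track=rewrite | github.com/wenzhaojie/smart-pred | smart_pred/model/local/histogram.py | find_precentile
-- ===== SOURCE A (Python) =====
-- def find_precentile(cdf, percent, head=False):
--     """ Returns the last whole bucket (minute) before the percentile """
--     for i, value in enumerate(cdf):
--         if percent < value:
--             if head:
--                 return max(0, i-1)
--             else:
--                 return min(i+1, len(cdf))
--     return len(cdf)
-- ===== SOURCE B (Python) =====
-- def find_precentile(cdf, percent, head=False):
--     """ Returns the last whole bucket (minute) before the percentile """
--     n = len(cdf)
--     idx = n
--     for i in range(n - 1, -1, -1):
--         if percent < cdf[i]: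
--             idx = i
--     if idx == n:
--         return n
--     return max(0, idx - 1) if head else min(idx + 1, n)
-- ===== Notes on version B (the rewrite author's own statement) =====
-- stated objective: alternative
-- what changed: B sweeps the list right-to-left keeping the leftmost index whose value exceeds percent, then applies the head/tail index formula once outside the loop, instead of A's forward scan with early return and the formula inlined in the branch.
import Mathlib
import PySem

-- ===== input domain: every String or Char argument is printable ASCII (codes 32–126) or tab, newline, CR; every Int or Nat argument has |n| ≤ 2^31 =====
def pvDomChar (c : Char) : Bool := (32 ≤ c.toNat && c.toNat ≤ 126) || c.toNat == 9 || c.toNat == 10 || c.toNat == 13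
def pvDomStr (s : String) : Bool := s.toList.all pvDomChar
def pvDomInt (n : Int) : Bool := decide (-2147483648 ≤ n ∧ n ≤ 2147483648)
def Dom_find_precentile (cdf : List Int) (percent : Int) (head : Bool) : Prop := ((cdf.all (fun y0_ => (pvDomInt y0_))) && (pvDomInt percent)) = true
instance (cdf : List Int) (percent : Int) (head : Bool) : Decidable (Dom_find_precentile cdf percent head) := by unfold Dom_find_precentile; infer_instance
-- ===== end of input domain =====

-- A forward scan with early return: first i with percent < cdf[i] decides the result inline.
-- B (alternative, same cost): right-to-left sweep keeping the leftmost hit, formula applied once after the loop.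

-- ===== PORT A =====
-- the 'for i, value in enumerate(cdf)' loop with its early returns
def find_precentile_loop (n percent : Int) (head : Bool) : List (Int × Int) → Int
  | [] => n
  | (i, v) :: rest =>
      if percent < v then
        (if head then max 0 (i - 1) else min (i + 1) n)
      else
        find_precentile_loop n percent head rest

def find_precentile (cdf : List Int) (percent : Int) (head : Bool) : Int :=
  find_precentile_loop (cdf.length : Int) percent head (PySem.List.enumerate cdf 0)

-- ===== PORT B =====
def find_precentile_alt (cdf : List Int) (percent : Int) (head : Bool) : Int :=
  let n : Int := (cdf.length : Int)
  let idx : Int :=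
    (PySem.List.pyRange (n - 1) (-1) (-1)).foldl
      (fun acc i => if percent < PySem.List.pyGetD cdf i 0 then i else acc) n
  if idx = n then n
  else if head then max 0 (idx - 1) else min (idx + 1) n

-- ===== PRECONDITION & SPEC =====
def Spec_find_precentile (cdf : List Int) (percent : Int) (head : Bool) (out : Int) : Prop := out = find_precentile_alt cdf percent head
instance (cdf : List Int) (percent : Int) (head : Bool) (out : Int) : Decidable (Spec_find_precentile cdf percent head out) := by unfold Spec_find_precentile; infer_instance

-- ===== CLAIM (what is proved, stated in full; the proofs are below) =====
def Claim_equal_find_precentile : Prop := ∀ (cdf : List Int) (percent : Int) (head : Bool), Dom_find_precentile cdf percent head → Spec_find_precentile cdf percent head (find_precentile cdf percent head)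

-- ===== LEMMAS AND PROOFS =====

-- A's loop over an enumeration computes the head/tail formula at the first hit (or n).
theorem find_precentile_loop_eq (n percent : Int) (head : Bool) :
    ∀ (cdf : List Int) (s : Int),
      find_precentile_loop n percent head (PySem.List.enumerate cdf s) =
        match cdf.findIdx? (fun v => percent < v) with
        | none => n
        | some k => if head then max 0 (s + k - 1) else min (s + k + 1) n := by
  intro cdf
  induction cdf with
  | nil => intro s; simp [PySem.List.enumerate_nil, find_precentile_loop, List.findIdx?_nil]
  | cons v t ih =>
      intro s
      rw [PySem.List.enumerate_cons]
      simp only [find_precentile_loop, List.findIdx?_cons]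
      by_cases h : percent < v
      · simp [h]
      · simp only [h, decide_eq_true_eq, ih (s + 1)]
        cases ht : t.findIdx? (fun v => percent < v) with
        | none => simp
        | some k =>
            simp only [Option.map_some]
            have : s + 1 + (k : Int) = s + ((k : Nat) + 1 : Nat) := by push_cast; ring
            cases head <;> simp [this]

-- B's right-to-left sweep computes the index of the first hit (or n).
theorem sweep_eq (percent : Int) :
    ∀ (cdf : List Int) (s n : Int),
      (PySem.List.enumerate cdf s).reverse.foldl
          (fun acc (p : Int × Int) => if percent < p.2 then p.1 else acc) n =
        match cdf.findIdx? (fun v => percent < v) with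
        | none => n
        | some k => s + (k : Int) := by
  intro cdf
  induction cdf with
  | nil => intro s n; simp [PySem.List.enumerate_nil, List.findIdx?_nil]
  | cons v t ih =>
      intro s n
      rw [PySem.List.enumerate_cons]
      simp only [List.reverse_cons, List.foldl_append, List.foldl_cons, List.foldl_nil,
        List.findIdx?_cons, ih (s + 1) n]
      by_cases h : percent < v
      · simp [h]
      · simp only [h, decide_eq_true_eq, if_neg, not_false_iff]
        cases ht : t.findIdx? (fun v => percent < v) with
        | none => simp
        | some k =>
            simp only [Option.map_some]
            push_cast; ring_nf

-- B's countdown range fold is the fold over the reversed enumeration.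
theorem alt_idx_eq (cdf : List Int) (percent : Int) :
    (PySem.List.pyRange ((cdf.length : Int) - 1) (-1) (-1)).foldl
        (fun acc i => if percent < PySem.List.pyGetD cdf i 0 then i else acc) (cdf.length : Int) =
      (PySem.List.enumerate cdf 0).reverse.foldl
        (fun acc (p : Int × Int) => if percent < p.2 then p.1 else acc) (cdf.length : Int) := by
  rw [PySem.List.pyRange_neg_one_eq_reverse]
  have h1 : ((-1 : Int) + 1) = 0 := by norm_num
  have h2 : ((cdf.length : Int) - 1 + 1) = (cdf.length : Int) := by ring
  rw [h1, h2]
  rw [PySem.List.enumerate_eq_map_pyRange (d := 0)]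
  simp only [PySem.List.len_eq]
  rw [← List.map_reverse, List.foldl_map]

theorem findIdx?_lt_length {p : Int → Bool} {cdf : List Int} {k : Nat}
    (h : cdf.findIdx? p = some k) : k < cdf.length :=
  List.findIdx?_eq_some_iff_findIdx_eq.mp h |>.1

theorem find_precentile_eq_alt (cdf : List Int) (percent : Int) (head : Bool) :
    find_precentile cdf percent head = find_precentile_alt cdf percent head := by
  unfold find_precentile find_precentile_alt
  simp only []
  rw [alt_idx_eq cdf percent, sweep_eq percent cdf 0 (cdf.length : Int),
      find_precentile_loop_eq (cdf.length : Int) percent head cdf 0]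
  cases ht : cdf.findIdx? (fun v => percent < v) with
  | none => simp
  | some k =>
      have hk : k < cdf.length := findIdx?_lt_length ht
      have hne : (0 : Int) + (k : Int) ≠ (cdf.length : Int) := by
        have : (k : Int) < (cdf.length : Int) := by exact_mod_cast hk
        omega
      simp only [if_neg hne]

-- ===== VERDICT (by name: the statement is the Claim_ definition above) =====
theorem find_precentile_spec : Claim_equal_find_precentile := by
  intro cdf percent head _
  exact find_precentile_eq_alt cdf percent head
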